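-- pv_equiv track=rewrite | github.com/ckohnke/disaster_bingo | disaster_bingo.py | insert_free_spaces
-- ===== SOURCE A (Python) =====
-- def insert_free_spaces(numbers, coords=[(2, 2)]):
--     return [
--         [
--             n if not (x, y) in coords else None
--             for x, n in enumerate(numbers[y])
--         ]
--         for y in range(len(numbers))
--     ]
-- ===== SOURCE B (Python) =====
-- def insert_free_spaces(numbers, coords=[(2, 2)]):
--     grid = [list(row) for row in numbers]
--     for x, y in coords:
--         if 0 <= y < len(grid) and 0 <= x < len(grid[y]):
--             grid[y][x] = None
--     return grid
-- ===== Notes on version B (the rewrite author's own statement) =====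
-- stated objective: faster
-- what changed: Instead of testing every cell for membership in coords (a linear scan per cell), B copies the grid once and loops over coords only, writing None at each in-bounds coordinate.
import Mathlib
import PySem

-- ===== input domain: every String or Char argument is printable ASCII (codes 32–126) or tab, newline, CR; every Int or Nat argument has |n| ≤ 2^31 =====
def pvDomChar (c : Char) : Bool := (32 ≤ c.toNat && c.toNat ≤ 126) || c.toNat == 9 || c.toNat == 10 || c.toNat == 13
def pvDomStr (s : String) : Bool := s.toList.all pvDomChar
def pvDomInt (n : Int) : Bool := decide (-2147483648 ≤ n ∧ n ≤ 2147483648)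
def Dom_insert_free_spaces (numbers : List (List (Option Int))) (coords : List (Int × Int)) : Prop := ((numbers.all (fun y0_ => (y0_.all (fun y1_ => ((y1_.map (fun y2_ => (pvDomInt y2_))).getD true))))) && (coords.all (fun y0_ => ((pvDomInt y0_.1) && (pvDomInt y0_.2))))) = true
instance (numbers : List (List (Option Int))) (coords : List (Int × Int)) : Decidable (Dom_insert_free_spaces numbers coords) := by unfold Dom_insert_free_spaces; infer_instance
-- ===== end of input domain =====

-- B masks grid cells by iterating over coords (one in-bounds write per coordinate) instead of
-- testing every cell for membership in coords; return value proved equal to A's on all inputs.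

-- ===== PORT A =====
-- literal port of A's nested comprehension: for y in range(len(numbers)),
-- for (x, n) in enumerate(numbers[y]), keep n unless (x, y) ∈ coords.
def insert_free_spaces (numbers : List (List (Option Int))) (coords : List (Int × Int)) : List (List (Option Int)) :=
  (PySem.List.pyRange 0 numbers.length 1).map (fun y =>
    (PySem.List.enumerate (PySem.List.pyGetD numbers y []) 0).map (fun p =>
      if (p.1, y) ∈ coords then none else p.2))

-- ===== PORT B =====
-- one coordinate write: grid[y][x] = None, guarded by the bounds check of Source B
def pvMark (grid : List (List (Option Int))) (c : Int × Int) : List (List (Option Int)) :=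
  if 0 ≤ c.2 ∧ c.2 < grid.length then
    if 0 ≤ c.1 ∧ c.1 < (grid.getD c.2.toNat []).length then
      grid.set c.2.toNat ((grid.getD c.2.toNat []).set c.1.toNat none)
    else grid
  else grid

def insert_free_spaces_alt (numbers : List (List (Option Int))) (coords : List (Int × Int)) : List (List (Option Int)) :=
  coords.foldl pvMark numbers

-- ===== PRECONDITION & SPEC =====
def Spec_insert_free_spaces (numbers : List (List (Option Int))) (coords : List (Int × Int)) (out : List (List (Option Int))) : Prop := out = insert_free_spaces_alt numbers coords
instance (numbers : List (List (Option Int))) (coords : List (Int × Int)) (out : List (List (Option Int))) : Decidable (Spec_insert_free_spaces numbers coords out) := by unfold Spec_insert_free_spaces; infer_instance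

-- ===== CLAIM (what is proved, stated in full; the proofs are below) =====
def Claim_equal_insert_free_spaces : Prop := ∀ (numbers : List (List (Option Int))) (coords : List (Int × Int)), Dom_insert_free_spaces numbers coords → Spec_insert_free_spaces numbers coords (insert_free_spaces numbers coords)

-- ===== LEMMAS AND PROOFS =====

-- cell? g j i = the (j,i) cell, none when either index is out of range
def pvCell? (g : List (List (Option Int))) (j i : Nat) : Option (Option Int) :=
  g[j]?.bind (fun r => r[i]?)

theorem pvMark_length (g : List (List (Option Int))) (c : Int × Int) :
    (pvMark g c).length = g.length := by
  unfold pvMark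
  split
  · split <;> simp
  · rfl

theorem pvFold_length (cs : List (Int × Int)) (g : List (List (Option Int))) :
    (cs.foldl pvMark g).length = g.length := by
  induction cs generalizing g with
  | nil => rfl
  | cons c cs ih => simpa [List.foldl_cons, pvMark_length] using ih (pvMark g c)

theorem pvCell_mark (g : List (List (Option Int))) (c : Int × Int) (j i : Nat) :
    pvCell? (pvMark g c) j i =
      if c = ((i : Int), (j : Int)) then (pvCell? g j i).map (fun _ => none)
      else pvCell? g j i := by
  obtain ⟨x, y⟩ := c
  by_cases hc : (x, y) = ((i : Int), (j : Int))
  · obtain ⟨hx, hy⟩ := Prod.mk.injEq .. ▸ hc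
    subst hx; subst hy
    rw [if_pos hc]
    unfold pvMark pvCell?
    dsimp only
    by_cases hj : j < g.length
    · have hrow : g.getD ((j : Int)).toNat [] = g[j]'hj := by
        simp [List.getD_eq_getElem?_getD, List.getElem?_eq_getElem hj]
      by_cases hi : i < (g[j]'hj).length
      · rw [if_pos ⟨by positivity, by exact_mod_cast hj⟩]
        rw [if_pos ⟨by positivity, by rw [hrow]; exact_mod_cast hi⟩]
        simp [hj, hi]
      · rw [if_pos ⟨by positivity, by exact_mod_cast hj⟩]
        rw [if_neg (by rw [hrow]; intro h; exact hi (by exact_mod_cast h.2))]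
        simp [List.getElem?_eq_getElem hj, List.getElem?_eq_none (Nat.not_lt.mp hi)]
    · rw [if_neg (fun h => hj (by exact_mod_cast h.2))]
      simp [List.getElem?_eq_none (Nat.not_lt.mp hj)]
  · rw [if_neg hc]
    unfold pvMark pvCell?
    dsimp only
    split_ifs with h1 h2
    · by_cases hyj : y.toNat = j
      · have hy : y = (j : Int) := by omega
        have hxi : x ≠ (i : Int) := fun hx => hc (by rw [hx, hy])
        have hxn : x.toNat ≠ i := by omega
        have hj : j < g.length := by
          have := h1.2; omega
        subst hyj
        simp [hj, hxn, List.getD_eq_getElem?_getD]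
      · simp [hyj]
    · rfl
    · rfl

theorem pvCell_fold (cs : List (Int × Int)) (g : List (List (Option Int))) (j i : Nat) :
    pvCell? (cs.foldl pvMark g) j i =
      if ((i : Int), (j : Int)) ∈ cs then (pvCell? g j i).map (fun _ => none)
      else pvCell? g j i := by
  induction cs generalizing g with
  | nil => simp
  | cons c cs ih =>
    rw [List.foldl_cons, ih, pvCell_mark]
    by_cases hm : ((i : Int), (j : Int)) ∈ cs
    · simp only [hm, if_true, List.mem_cons, or_true]
      split_ifs <;> cases pvCell? g j i <;> rfl
    · by_cases hc : c = ((i : Int), (j : Int)) <;>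
        simp [hm, hc, List.mem_cons, eq_comm]

theorem pvA_length (numbers : List (List (Option Int))) (coords : List (Int × Int)) :
    (insert_free_spaces numbers coords).length = numbers.length := by
  unfold insert_free_spaces
  simp [PySem.List.length_pyRange_one]

theorem pvCell_A (numbers : List (List (Option Int))) (coords : List (Int × Int)) (j i : Nat) :
    pvCell? (insert_free_spaces numbers coords) j i =
      if ((i : Int), (j : Int)) ∈ coords then (pvCell? numbers j i).map (fun _ => none)
      else pvCell? numbers j i := by
  unfold insert_free_spaces pvCell?
  by_cases hj : j < numbers.length
  · rw [PySem.List.getElem?_map_pyRange_zero _ _ _ hj]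
    simp only [Option.bind_some]
    rw [List.getElem?_map, PySem.List.getElem?_enumerate]
    simp only [PySem.List.pyGetD_natCast, List.getD_eq_getElem?_getD,
      List.getElem?_eq_getElem hj, Option.getD_some, zero_add]
    cases h : (numbers[j]'hj)[i]? with
    | none => simp [h, Option.bind]
    | some v =>
      simp only [Option.map_some, Option.bind_some, h]
      split_ifs <;> rfl
  · rw [List.getElem?_eq_none (by simpa [PySem.List.length_pyRange_one] using Nat.not_lt.mp hj),
        List.getElem?_eq_none (Nat.not_lt.mp hj)]
    simp

theorem pv_rows_eq (a b : List (List (Option Int)))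
    (hlen : a.length = b.length)
    (hcell : ∀ j i, pvCell? a j i = pvCell? b j i) : a = b := by
  apply List.ext_getElem?
  intro j
  by_cases hj : j < a.length
  · have hjb : j < b.length := hlen ▸ hj
    rw [List.getElem?_eq_getElem hj, List.getElem?_eq_getElem hjb]
    congr 1
    apply List.ext_getElem?
    intro i
    have := hcell j i
    unfold pvCell? at this
    rwa [List.getElem?_eq_getElem hj, List.getElem?_eq_getElem hjb] at this
  · rw [List.getElem?_eq_none (by omega), List.getElem?_eq_none (by omega)]

-- ===== VERDICT (by name: the statement is the Claim_ definition above) =====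
theorem insert_free_spaces_spec : Claim_equal_insert_free_spaces := by
  intro numbers coords _
  unfold Spec_insert_free_spaces insert_free_spaces_alt
  apply pv_rows_eq
  · rw [pvA_length, pvFold_length]
  · intro j i
    rw [pvCell_A, pvCell_fold]
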